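-- pv_equiv track=rewrite | github.com/deep110/aoc-solutions | aoc/year2018/day05.py | part2
-- ===== SOURCE A (Python) =====
-- from typing import List
--
-- def part1(polymer: List[int]):
--     processed_polymer = []
--     for p in polymer:
--         if len(processed_polymer) > 0 and p ^ processed_polymer[-1] == 32:
--             processed_polymer.pop()
--         else:
--             processed_polymer.append(p)
--
--     return len(processed_polymer), processed_polymer
--
-- def part2(processed_polymer):
--     least_len = 100000
--     for i in range(ord("a"), ord("z")):
--         p = filter(lambda x: x != i and x != i - 32, processed_polymer)
--         processed_len, _ = part1(p)
--         if processed_len < least_len: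
--             least_len = processed_len
--
--     return least_len
-- ===== SOURCE B (Python) =====
-- def _scan(xs):
--     # one left-to-right pass: delete every adjacent cancelling pair met
--     out = []
--     i = 0
--     changed = False
--     n = len(xs)
--     while i < n:
--         if i + 1 < n and xs[i] ^ xs[i + 1] == 32:
--             i += 2
--             changed = True
--         else:
--             out.append(xs[i])
--             i += 1
--     return out, changed
--
-- def part2(processed_polymer):
--     best = 100000
--     for i in range(ord("a"), ord("z")):
--         xs = [x for x in processed_polymer if x != i and x != i - 32]
--         while True:
--             xs, changed = _scan(xs)
--             if not changed:
--                 break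
--         best = min(best, len(xs))
--     return best
-- ===== Notes on version B (the rewrite author's own statement) =====
-- stated objective: alternative
-- what changed: Replaces the single-pass stack reduction (part1) by a fixed-point loop of full left-to-right scans that delete adjacent cancelling pairs until a pass makes no deletion, and folds the 25 letters with min(); correctness rests on the stack normal form being the unique fixed point.
import Mathlib
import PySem

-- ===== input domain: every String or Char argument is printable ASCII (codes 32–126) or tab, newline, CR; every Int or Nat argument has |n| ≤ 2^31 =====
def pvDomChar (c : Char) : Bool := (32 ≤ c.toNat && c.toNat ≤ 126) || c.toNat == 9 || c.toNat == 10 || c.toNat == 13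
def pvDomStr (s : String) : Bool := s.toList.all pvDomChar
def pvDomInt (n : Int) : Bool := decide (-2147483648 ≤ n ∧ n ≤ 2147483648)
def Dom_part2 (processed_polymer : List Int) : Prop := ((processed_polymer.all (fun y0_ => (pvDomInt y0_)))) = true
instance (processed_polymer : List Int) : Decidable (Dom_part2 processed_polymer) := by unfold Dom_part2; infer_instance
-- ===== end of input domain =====

-- B replaces A's single-pass stack reduction (part1) by a fixed-point loop of full
-- left-to-right scans deleting adjacent cancelling pairs (alternative decomposition).

-- ===== PORT A =====

-- one iteration of part1's loop: pop on cancel, else append (the len>0 guard makes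
-- processed_polymer[-1] defined; the getD default is never reached under the guard)
def pvStepA (s : List Int) (p : Int) : List Int :=
  if 0 < s.length ∧ PySem.Int.bxor p ((PySem.List.pyGet? s (-1)).getD 0) = 32 then
    s.dropLast
  else
    s ++ [p]

def part1 (polymer : List Int) : Int × List Int :=
  let processed := polymer.foldl pvStepA []
  ((processed.length : Int), processed)

def part2 (processed_polymer : List Int) : Int :=
  (PySem.List.pyRange 97 122 1).foldl
    (fun least_len i =>
      let p := processed_polymer.filter (fun x => x != i && x != i - 32)
      let processed_len := (part1 p).1
      if processed_len < least_len then processed_len else least_len)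
    100000

-- ===== PORT B =====

-- _scan: one left-to-right pass deleting every adjacent cancelling pair met,
-- reporting whether anything was deleted
def pvScan : List Int → List Int × Bool
  | x :: y :: t =>
      if PySem.Int.bxor x y = 32 then
        ((pvScan t).1, true)
      else
        (x :: (pvScan (y :: t)).1, (pvScan (y :: t)).2)
  | [x] => ([x], false)
  | [] => ([], false)

-- needed by pvReduce's termination argument
theorem pvScan_le (l : List Int) : (pvScan l).1.length ≤ l.length := by
  fun_induction pvScan l with
  | case1 x y t hc ih => simpa using Nat.le_trans ih (by omega)
  | case2 x y t hc ih => simpa using ih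
  | case3 x => simp
  | case4 => simp

-- needed by pvReduce's termination argument
theorem pvScan_shortens (l : List Int) (h : (pvScan l).2 = true) : (pvScan l).1.length < l.length := by
  fun_induction pvScan l with
  | case1 x y t _ ih => have := pvScan_le t; simp; omega
  | case2 x y t hc ih => have := ih h; simp at this ⊢; omega
  | case3 x => simp at h
  | case4 => simp at h

-- the 'while True: scan; if not changed: break' loop
def pvReduce (l : List Int) : List Int :=
  if h : (pvScan l).2 = true then pvReduce (pvScan l).1 else (pvScan l).1
termination_by l.length
decreasing_by exact pvScan_shortens l h

def part2_alt (processed_polymer : List Int) : Int :=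
  (PySem.List.pyRange 97 122 1).foldl
    (fun best i =>
      let xs := processed_polymer.filter (fun x => x != i && x != i - 32)
      min best ((pvReduce xs).length : Int))
    100000

-- ===== PRECONDITION & SPEC =====
def Spec_part2 (processed_polymer : List Int) (out : Int) : Prop := out = part2_alt processed_polymer
instance (processed_polymer : List Int) (out : Int) : Decidable (Spec_part2 processed_polymer out) := by unfold Spec_part2; infer_instance

-- ===== CLAIM (what is proved, stated in full; the proofs are below) =====
def Claim_equal_part2 : Prop := ∀ (processed_polymer : List Int), Dom_part2 processed_polymer → Spec_part2 processed_polymer (part2 processed_polymer)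

-- ===== LEMMAS AND PROOFS =====

-- Python's xor is left-cancellative
theorem pv_bxor_left_cancel (x y t : Int) (h : PySem.Int.bxor x y = PySem.Int.bxor x t) : y = t := by
  have nx : ∀ a b c : Nat, a ^^^ b = a ^^^ c → b = c := by
    intro a b c hh
    have h2 : a ^^^ (a ^^^ b) = a ^^^ (a ^^^ c) := by rw [hh]
    simpa [← Nat.xor_assoc] using h2
  unfold PySem.Int.bxor at h
  by_cases hx : 0 ≤ x <;> by_cases hy : 0 ≤ y <;> by_cases ht : 0 ≤ t <;>
    simp only [hx, hy, ht, if_pos, if_neg, not_false_iff] at h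
  · have := nx _ _ _ (by exact_mod_cast h); omega
  · omega
  · omega
  · have := nx _ _ _ (by exact_mod_cast (show ((x.toNat ^^^ (-y-1).toNat : Nat) : Int) = ((x.toNat ^^^ (-t-1).toNat : Nat) : Int) by omega)); omega
  · have := nx _ _ _ (by exact_mod_cast (show (((-x-1).toNat ^^^ y.toNat : Nat) : Int) = (((-x-1).toNat ^^^ t.toNat : Nat) : Int) by omega)); omega
  · omega
  · omega
  · have := nx _ _ _ (by exact_mod_cast h); omega

-- reversed-stack form of A's step (head of the list = top of the stack)
def pvStepR (r : List Int) (p : Int) : List Int :=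
  match r with
  | [] => [p]
  | t :: rest => if PySem.Int.bxor p t = 32 then rest else p :: t :: rest

def pvNe32 (a b : Int) : Prop := PySem.Int.bxor a b ≠ 32

theorem pvStepA_rev (r : List Int) (p : Int) : pvStepA r.reverse p = (pvStepR r p).reverse := by
  cases r with
  | nil => simp [pvStepA, pvStepR]
  | cons t rest =>
      simp only [List.reverse_cons, pvStepA, pvStepR, PySem.List.pyGet?_neg_one_append_singleton]
      by_cases hc : PySem.Int.bxor p t = 32 <;> simp [hc]

theorem pvFoldA_rev (l : List Int) : ∀ r : List Int, l.foldl pvStepA r.reverse = (l.foldl pvStepR r).reverse := by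
  induction l with
  | nil => intro r; simp
  | cons x t ih => intro r; simp only [List.foldl_cons, pvStepA_rev, ih]

theorem pvStepR_irr (r : List Int) (p : Int) (h : List.IsChain pvNe32 r) :
    List.IsChain pvNe32 (pvStepR r p) := by
  cases r with
  | nil => simp [pvStepR]
  | cons t rest =>
      by_cases hc : PySem.Int.bxor p t = 32
      · simpa [pvStepR, hc] using h.of_cons
      · simp only [pvStepR, hc, if_neg, not_false_iff]
        exact (List.isChain_cons).mpr ⟨fun b hb => by simp at hb; subst hb; exact hc, h⟩

theorem pvStepR_cancel (r : List Int) (x y : Int) (hxy : PySem.Int.bxor x y = 32)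
    (hr : List.IsChain pvNe32 r) : pvStepR (pvStepR r x) y = r := by
  cases r with
  | nil =>
      simp only [pvStepR]
      rw [if_pos (by rw [PySem.Int.bxor_comm]; exact hxy)]
  | cons t rest =>
      by_cases hc : PySem.Int.bxor x t = 32
      · have hyt : y = t := pv_bxor_left_cancel x y t (hxy.trans hc.symm)
        simp only [pvStepR, hc, if_pos]
        cases rest with
        | nil => simp [hyt]
        | cons h2 r2 =>
            have hne : pvNe32 t h2 := List.IsChain.rel hr
            simp only [hyt]
            rw [if_neg hne]
      · simp only [pvStepR, hc, if_neg, not_false_iff]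
        rw [if_pos (by rw [PySem.Int.bxor_comm]; exact hxy)]

-- one scan pass does not change the stack normal form
theorem pvScan_foldl (l : List Int) : ∀ r : List Int, List.IsChain pvNe32 r →
    (pvScan l).1.foldl pvStepR r = l.foldl pvStepR r := by
  fun_induction pvScan l with
  | case1 x y t hc ih =>
      intro r hr
      simp only [List.foldl_cons]
      rw [ih r hr, pvStepR_cancel r x y hc hr]
  | case2 x y t hc ih =>
      intro r hr
      simp only [List.foldl_cons]
      exact ih (pvStepR r x) (pvStepR_irr r x hr)
  | case3 x => intro r _; simp
  | case4 => intro r _; simp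

-- an unchanged pass means the list is returned as is and is irreducible
theorem pvScan_false (l : List Int) (h : (pvScan l).2 = false) :
    (pvScan l).1 = l ∧ List.IsChain pvNe32 l := by
  fun_induction pvScan l with
  | case1 x y t hc ih => simp at h
  | case2 x y t hc ih =>
      obtain ⟨h1, h2⟩ := ih h
      refine ⟨by simp [h1], (List.isChain_cons).mpr ⟨fun b hb => ?_, h2⟩⟩
      simp at hb; subst hb; exact hc
  | case3 x => exact ⟨rfl, by simp⟩
  | case4 => exact ⟨rfl, by simp⟩

-- folding an irreducible list onto a compatible irreducible stack only pushes
theorem pvFoldR_push (l : List Int) : ∀ r : List Int, List.IsChain pvNe32 l → List.IsChain pvNe32 r →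
    (∀ a b, l.head? = some a → r.head? = some b → pvNe32 a b) →
    l.foldl pvStepR r = l.reverse ++ r := by
  induction l with
  | nil => intro r _ _ _; simp
  | cons x t ih =>
      intro r hl hr hcross
      have hstep : pvStepR r x = x :: r := by
        cases r with
        | nil => simp [pvStepR]
        | cons b rb =>
            simp only [pvStepR]
            rw [if_neg (hcross x b (by simp) (by simp))]
      simp only [List.foldl_cons, hstep]
      rw [ih (x :: r) hl.of_cons
          ((List.isChain_cons).mpr ⟨fun b hb => by
              cases r with
              | nil => simp at hb
              | cons b0 rb =>
                  simp at hb
                  subst hb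
                  exact hcross x b0 (by simp) (by simp), hr⟩)
          (fun a b ha hb => by
            simp at hb
            subst hb
            cases t with
            | nil => simp at ha
            | cons a0 t0 =>
                simp at ha
                subst ha
                have hx : pvNe32 x a0 := List.IsChain.rel hl
                unfold pvNe32 at hx ⊢
                rw [PySem.Int.bxor_comm]
                exact hx)]
      simp

-- the fixed-point loop computes the reverse of the stack normal form
theorem pvReduce_eq (l : List Int) : pvReduce l = (l.foldl pvStepR []).reverse := by
  fun_induction pvReduce l with
  | case1 l h ih =>
      rw [ih, pvScan_foldl l [] (by simp)]
  | case2 l h =>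
      obtain ⟨h1, h2⟩ := pvScan_false l (by simpa using h)
      rw [h1, pvFoldR_push l [] h2 (by simp) (by simp)]
      simp

-- hence part1's result list is exactly pvReduce's
theorem pvPerLetter (p : List Int) : (part1 p).1 = ((pvReduce p).length : Int) := by
  simp only [part1]
  rw [pvReduce_eq, show ([] : List Int) = ([] : List Int).reverse from rfl, pvFoldA_rev]
  simp

-- ===== VERDICT (by name: the statement is the Claim_ definition above) =====
theorem part2_spec : Claim_equal_part2 := by
  intro pp _
  unfold Spec_part2 part2 part2_alt
  have key : ∀ (L : List Int) (acc : Int),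
      L.foldl (fun least_len i =>
        let p := pp.filter (fun x => x != i && x != i - 32)
        let processed_len := (part1 p).1
        if processed_len < least_len then processed_len else least_len) acc
    = L.foldl (fun best i =>
        let xs := pp.filter (fun x => x != i && x != i - 32)
        min best ((pvReduce xs).length : Int)) acc := by
    intro L
    induction L with
    | nil => intro acc; rfl
    | cons i L ih =>
        intro acc
        simp only [List.foldl_cons]
        rw [ih]
        congr 1
        rw [pvPerLetter, min_def]
        split_ifs <;> omega
  exact key _ _
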